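-- pv_equiv track=rewrite | github.com/tnenglert/CodeIR | tests/eval/runners/run_aider_comparison.py | score_task
-- ===== SOURCE A (Python) =====
-- from typing import Any, Dict, List, Optional, Sequence, Tuple
--
-- def score_task(
--     ranked_ids: Sequence[str],
--     ground_truth_ids: Sequence[str],
-- ) -> Dict[str, Any]:
--     """Score a task result against ground truth."""
--     truth = set(ground_truth_ids)
--     ranked = list(ranked_ids)[:5]
--
--     top1_hit = 1 if ranked and ranked[0] in truth else 0
--     top3_hit = 1 if any(e in truth for e in ranked[:3]) else 0
--     any_hit = 1 if any(e in truth for e in ranked) else 0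
--
--     return {
--         "top1_hit": top1_hit,
--         "top3_hit": top3_hit,
--         "any_hit": any_hit,
--     }
-- ===== SOURCE B (Python) =====
-- def score_task(ranked_ids, ground_truth_ids):
--     """Score a task result against ground truth (single first-hit scan)."""
--     truth = set(ground_truth_ids)
--     first_hit = None
--     i = 0
--     for e in list(ranked_ids)[:5]:
--         if e in truth:
--             first_hit = i
--             break
--         i += 1
--     return {
--         "top1_hit": 1 if first_hit == 0 else 0,
--         "top3_hit": 1 if first_hit is not None and first_hit < 3 else 0,
--         "any_hit": 1 if first_hit is not None else 0,
--     }
-- ===== Notes on version B (the rewrite author's own statement) =====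
-- stated objective: alternative
-- what changed: B replaces A's three independent membership scans (head check, any over ranked[:3], any over ranked) by one pass that finds the rank of the first hit and thresholds that single index for all three scores.
import Mathlib
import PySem

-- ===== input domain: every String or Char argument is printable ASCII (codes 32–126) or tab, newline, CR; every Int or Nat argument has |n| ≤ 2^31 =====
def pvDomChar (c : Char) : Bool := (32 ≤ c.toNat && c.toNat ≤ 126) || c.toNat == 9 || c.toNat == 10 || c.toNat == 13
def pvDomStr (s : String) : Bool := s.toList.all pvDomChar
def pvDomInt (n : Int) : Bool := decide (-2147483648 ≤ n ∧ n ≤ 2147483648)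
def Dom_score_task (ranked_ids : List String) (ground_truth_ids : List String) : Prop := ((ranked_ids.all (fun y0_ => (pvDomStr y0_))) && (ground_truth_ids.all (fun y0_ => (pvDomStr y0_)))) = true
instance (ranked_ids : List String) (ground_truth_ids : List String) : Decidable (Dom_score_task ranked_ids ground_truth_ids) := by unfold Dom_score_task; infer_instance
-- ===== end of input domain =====

-- B replaces A's three independent membership scans by one pass computing the first-hit
-- rank and thresholding it; same cost class, different decomposition (objective: alternative).

-- ===== PORT A =====
def score_task (ranked_ids : List String) (ground_truth_ids : List String) : List (String × Int) :=
  let truth : PySem.Set String := PySem.Set.ofList ground_truth_ids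
  let ranked := PySem.List.slice ranked_ids none (some 5)
  let top1_hit : Int :=
    match ranked with
    | [] => 0
    | e :: _ => if PySem.Set.contains truth e then 1 else 0
  let top3_hit : Int :=
    if (PySem.List.slice ranked none (some 3)).any (fun e => PySem.Set.contains truth e) then 1 else 0
  let any_hit : Int :=
    if ranked.any (fun e => PySem.Set.contains truth e) then 1 else 0
  [("top1_hit", top1_hit), ("top3_hit", top3_hit), ("any_hit", any_hit)]

-- ===== PORT B =====
-- B's for-loop with break and counter i: first index (from n) of an element in truth
def firstHit (c : String → Bool) : List String → Nat → Option Nat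
  | [], _ => none
  | e :: rest, n => if c e then some n else firstHit c rest (n + 1)

def score_task_alt (ranked_ids : List String) (ground_truth_ids : List String) : List (String × Int) :=
  let truth : PySem.Set String := PySem.Set.ofList ground_truth_ids
  let fh := firstHit (fun e => PySem.Set.contains truth e) (PySem.List.slice ranked_ids none (some 5)) 0
  [("top1_hit", if fh = some 0 then 1 else 0),
   ("top3_hit", if (match fh with | some i => decide (i < 3) | none => false) then 1 else 0),
   ("any_hit", if fh.isSome then 1 else 0)]

-- ===== PRECONDITION & SPEC =====
def Spec_score_task (ranked_ids : List String) (ground_truth_ids : List String) (out : List (String × Int)) : Prop := out = score_task_alt ranked_ids ground_truth_ids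
instance (ranked_ids : List String) (ground_truth_ids : List String) (out : List (String × Int)) : Decidable (Spec_score_task ranked_ids ground_truth_ids out) := by unfold Spec_score_task; infer_instance

-- ===== CLAIM (what is proved, stated in full; the proofs are below) =====
def Claim_equal_score_task : Prop := ∀ (ranked_ids : List String) (ground_truth_ids : List String), Dom_score_task ranked_ids ground_truth_ids → Spec_score_task ranked_ids ground_truth_ids (score_task ranked_ids ground_truth_ids)

-- ===== LEMMAS AND PROOFS =====

lemma firstHit_ge (c : String → Bool) (l : List String) (n m : Nat)
    (h : firstHit c l n = some m) : n ≤ m := by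
  induction l generalizing n with
  | nil => simp [firstHit] at h
  | cons e rest ih =>
    by_cases hc : c e
    · simp [firstHit, hc] at h; omega
    · simp [firstHit, hc] at h
      have := ih (n + 1) h; omega

lemma firstHit_isSome (c : String → Bool) (l : List String) (n : Nat) :
    (firstHit c l n).isSome = l.any c := by
  induction l generalizing n with
  | nil => simp [firstHit]
  | cons e rest ih =>
    by_cases hc : c e <;> simp [firstHit, hc, ih]

lemma firstHit_take_any (c : String → Bool) (l : List String) (n k : Nat) :
    (l.take k).any c = decide (∃ m, firstHit c l n = some m ∧ m < n + k) := by
  induction l generalizing n k with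
  | nil => simp [firstHit]
  | cons e rest ih =>
    cases k with
    | zero =>
      simp only [List.take_zero, List.any_nil]
      symm
      rw [decide_eq_false_iff_not]
      rintro ⟨m, hm, hlt⟩
      have := firstHit_ge c (e :: rest) n m hm
      omega
    | succ k =>
      by_cases hc : c e
      · simp [firstHit, hc]
      · simp only [List.take_succ_cons, List.any_cons, hc, Bool.false_or, firstHit]
        rw [ih (n + 1) k]
        congr 1
        apply propext
        constructor <;> rintro ⟨m, hm, hlt⟩ <;> exact ⟨m, hm, by omega⟩

-- ===== VERDICT (by name: the statement is the Claim_ definition above) =====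
lemma top1_eq (c : String → Bool) (l : List String) :
    (match l with | [] => (0 : Int) | e :: _ => if c e then 1 else 0)
      = (if firstHit c l 0 = some 0 then 1 else 0) := by
  cases l with
  | nil => simp [firstHit]
  | cons e rest =>
    by_cases hce : c e
    · simp [firstHit, hce]
    · simp only [firstHit, if_neg hce]
      rcases h : firstHit c rest 1 with _ | m
      · simp
      · have h1 := firstHit_ge c rest 1 m h
        have h2 : ¬ (some m = some 0) := by simp; omega
        simp [h2]

lemma top3_eq (c : String → Bool) (l : List String) :
    (if (l.take 3).any c then (1 : Int) else 0)
      = (if (match firstHit c l 0 with | some i => decide (i < 3) | none => false) then 1 else 0) := by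
  rw [firstHit_take_any c l 0 3]
  rcases h : firstHit c l 0 with _ | m <;> simp

lemma any_eq (c : String → Bool) (l : List String) :
    (if l.any c then (1 : Int) else 0) = (if (firstHit c l 0).isSome then 1 else 0) := by
  rw [firstHit_isSome c l 0]

lemma score_task_eq (ranked_ids ground_truth_ids : List String) :
    score_task ranked_ids ground_truth_ids = score_task_alt ranked_ids ground_truth_ids := by
  unfold score_task score_task_alt
  dsimp only
  rw [show PySem.List.slice (PySem.List.slice ranked_ids none (some 5)) none (some 3)
        = (PySem.List.slice ranked_ids none (some 5)).take 3 by
      simpa using PySem.List.slice_to (PySem.List.slice ranked_ids none (some 5)) (b := 3) (by norm_num)]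
  rw [top1_eq, top3_eq, any_eq]

-- ===== VERDICT (by name: the statement is the Claim_ definition above) =====
theorem score_task_spec : Claim_equal_score_task := by
  intro ranked_ids ground_truth_ids _
  exact score_task_eq ranked_ids ground_truth_ids
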